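-- pv_equiv track=rewrite | github.com/pyxis-roc/fuzzing-strata | cover.py | make_continuous
-- ===== SOURCE A (Python) =====
-- def make_continuous(pattern):
--     last_c = None
--     out = []
--     for i, c in enumerate(pattern):
--         if c == '0' and last_c == 'X': # only X0 introduces discontinuities
--             prefix = pattern[:i-1]
--             p = make_continuous(pattern[i:])
--             out.extend([prefix + "0" + pp for pp in p])
--             out.extend([prefix + "1" + pp for pp in p])
--             break
--         last_c = c
--     else:
--         out.append(pattern)
--
--     return out
-- ===== SOURCE B (Python) =====
-- def make_continuous(pattern):
--     # table of X-positions immediately followed by '0', then iterative doubling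
--     positions = [i for i, (a, b) in enumerate(zip(pattern, pattern[1:]))
--                  if a == 'X' and b == '0']
--     outs = [list(pattern)]
--     for pos in positions:
--         outs = [t for s in outs
--                   for t in (s[:pos] + ['0'] + s[pos+1:], s[:pos] + ['1'] + s[pos+1:])]
--     return [''.join(s) for s in outs]
-- ===== Notes on version B (the rewrite author's own statement) =====
-- stated objective: alternative
-- what changed: Replaces A's recursion that branches on the first X-before-0 and re-scans each suffix with a single pass collecting all X0 positions followed by an iterative doubling of the output list.
import Mathlib
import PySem

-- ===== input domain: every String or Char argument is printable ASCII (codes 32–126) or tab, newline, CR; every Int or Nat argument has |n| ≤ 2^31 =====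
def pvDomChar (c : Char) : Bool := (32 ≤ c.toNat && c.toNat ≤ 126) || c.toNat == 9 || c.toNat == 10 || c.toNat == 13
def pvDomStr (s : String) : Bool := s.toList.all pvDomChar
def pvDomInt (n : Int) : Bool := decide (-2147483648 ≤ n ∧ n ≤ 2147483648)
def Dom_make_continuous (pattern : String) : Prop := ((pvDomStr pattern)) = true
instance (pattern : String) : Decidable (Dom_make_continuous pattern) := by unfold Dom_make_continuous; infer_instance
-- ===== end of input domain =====

-- B replaces A's recursion on the suffix after the first X0 pair by a single scan
-- collecting all X0 positions followed by an iterative-doubling expansion (objective: alternative).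

-- ===== PORT A =====
-- the enumerate loop with break: returns the index of the first '0' whose predecessor is 'X'
def mcAux : List Char → Nat → Option Char → Option Nat
  | [], _, _ => none
  | c :: rs, i, last =>
      if c = '0' ∧ last = some 'X' then some i else mcAux rs (i+1) (some c)

-- bounds used for termination of the recursion on pattern[i:]
theorem mcAux_bounds : ∀ (cs : List Char) (i : Nat) (last : Option Char) (j : Nat),
    mcAux cs i last = some j → i ≤ j ∧ j < i + cs.length := by
  intro cs
  induction cs with
  | nil => intro i last j h; simp [mcAux] at h
  | cons c rs ih =>
      intro i last j h
      simp only [mcAux] at h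
      split at h
      · cases h; simp
      · have := ih (i+1) (some c) j h
        simp only [List.length_cons]
        omega

theorem mcAux_none_pos : ∀ (cs : List Char) (j : Nat), mcAux cs 0 none = some j → 1 ≤ j := by
  intro cs j h
  cases cs with
  | nil => simp [mcAux] at h
  | cons c rs =>
      simp only [mcAux] at h
      split at h
      · rename_i hc; exact absurd hc.2 (by simp)
      · exact (mcAux_bounds rs 1 (some c) j h).1

def make_continuous_core (p : List Char) : List (List Char) :=
  match h : mcAux p 0 none with
  | none => [p]
  | some j =>
      let pre := p.take (j - 1)
      let r := make_continuous_core (p.drop j)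
      r.map (fun pp => pre ++ ['0'] ++ pp) ++ r.map (fun pp => pre ++ ['1'] ++ pp)
termination_by p.length
decreasing_by
  have h1 := mcAux_none_pos p j h
  have h2 := (mcAux_bounds p 0 none j h).2
  simp only [List.length_drop]
  omega

def make_continuous (pattern : String) : List String :=
  (make_continuous_core pattern.toList).map String.ofList

-- ===== PORT B =====
-- positions of all 'X' immediately followed by '0' (the enumerate(zip(...)) comprehension)
def altPos : List Char → Nat → List Nat
  | a :: b :: rs, i => (if a = 'X' ∧ b = '0' then [i] else []) ++ altPos (b :: rs) (i+1)
  | _, _ => []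

-- s[:pos] + [b] + s[pos+1:]
def altSet (s : List Char) (pos : Nat) (b : Char) : List Char :=
  s.take pos ++ [b] ++ s.drop (pos+1)

-- one round of the doubling loop
def altStep (outs : List (List Char)) (pos : Nat) : List (List Char) :=
  outs.flatMap (fun s => [altSet s pos '0', altSet s pos '1'])

def make_continuous_alt (pattern : String) : List String :=
  ((altPos pattern.toList 0).foldl altStep [pattern.toList]).map (fun s => String.ofList s)

-- ===== PRECONDITION & SPEC =====
def Spec_make_continuous (pattern : String) (out : List String) : Prop := out = make_continuous_alt pattern
instance (pattern : String) (out : List String) : Decidable (Spec_make_continuous pattern out) := by unfold Spec_make_continuous; infer_instance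

-- ===== CLAIM (what is proved, stated in full; the proofs are below) =====
def Claim_equal_make_continuous : Prop := ∀ (pattern : String), Dom_make_continuous pattern → Spec_make_continuous pattern (make_continuous pattern)

-- ===== LEMMAS AND PROOFS =====

-- indices produced by altPos are just shifted
theorem altPos_shift : ∀ (cs : List Char) (i j : Nat),
    altPos cs (i + j) = (altPos cs i).map (· + j) := by
  intro cs
  induction cs with
  | nil => intro i j; simp [altPos]
  | cons a rest ih =>
      intro i j
      cases rest with
      | nil => simp [altPos]
      | cons b rs =>
          have h := ih (i+1) j
          simp only [altPos, List.map_append]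
          rw [show i + 1 + j = (i + j) + 1 from by omega] at h
          rw [h]
          split_ifs <;> simp

-- mcAux run with a remembered last char agrees with the head of altPos
theorem mcAux_altPos : ∀ (cs : List Char) (i : Nat) (c : Char),
    mcAux cs (i+1) (some c) = ((altPos (c :: cs) i).head?).map (· + 1) := by
  intro cs
  induction cs with
  | nil => intro i c; simp [mcAux, altPos]
  | cons d ds ih =>
      intro i c
      simp only [mcAux, altPos, Option.some.injEq]
      by_cases h : d = '0' ∧ c = 'X'
      · rw [if_pos h, if_pos ⟨h.2, h.1⟩]; simp
      · rw [if_neg h, if_neg (fun hh => h ⟨hh.2, hh.1⟩)]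
        rw [ih (i+1) d]
        simp

theorem mcAux_first (p : List Char) :
    mcAux p 0 none = ((altPos p 0).head?).map (· + 1) := by
  cases p with
  | nil => simp [mcAux, altPos]
  | cons c rs =>
      simp only [mcAux]
      rw [if_neg (by simp), mcAux_altPos rs 0 c]

-- every produced index is ≥ the start index
theorem altPos_lb : ∀ (cs : List Char) (s m : Nat) (t : List Nat),
    altPos cs s = m :: t → s ≤ m := by
  intro cs
  induction cs with
  | nil => intro s m t h; simp [altPos] at h
  | cons a rest ih =>
      intro s m t h
      cases rest with
      | nil => simp [altPos] at h
      | cons b rs =>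
          simp only [altPos] at h
          split_ifs at h with hc
          · simp at h; omega
          · simp at h
            have := ih (s+1) m t h
            omega

-- the tail of altPos restarts at the character after the matched pair
theorem altPos_tail : ∀ (cs : List Char) (s m : Nat) (t : List Nat),
    altPos cs s = m :: t → t = altPos (cs.drop (m + 1 - s)) (m + 1) := by
  intro cs
  induction cs with
  | nil => intro s m t h; simp [altPos] at h
  | cons a rest ih =>
      intro s m t h
      cases rest with
      | nil => simp [altPos] at h
      | cons b rs =>
          simp only [altPos] at h
          split_ifs at h with hc
          · simp at h
            obtain ⟨hm, ht⟩ := h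
            subst hm
            rw [show s + 1 - s = 1 from by omega]
            simpa using ht.symm
          · simp at h
            have hlb := altPos_lb (b :: rs) (s+1) m t h
            have := ih (s+1) m t h
            rw [this]
            rw [show m + 1 - s = (m + 1 - (s+1)) + 1 from by omega]
            simp

-- the fold distributes over ++ of the accumulator
theorem foldl_altStep_append : ∀ (l : List Nat) (xs ys : List (List Char)),
    l.foldl altStep (xs ++ ys) = l.foldl altStep xs ++ l.foldl altStep ys := by
  intro l
  induction l with
  | nil => intro xs ys; simp
  | cons q qs ih =>
      intro xs ys
      simp only [List.foldl_cons]
      rw [show altStep (xs ++ ys) q = altStep xs q ++ altStep ys q from by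
        simp [altStep]]
      exact ih _ _

theorem altSet_prefix (pre s : List Char) (q : Nat) (b : Char) :
    altSet (pre ++ s) (q + pre.length) b = pre ++ altSet s q b := by
  unfold altSet
  rw [List.take_append, List.drop_append]
  rw [List.take_of_length_le (by omega), List.drop_eq_nil_of_le (by omega)]
  simp
  congr 2
  omega

-- a common prefix of length j factors out of the fold over shifted positions
theorem foldl_altStep_prefix : ∀ (qs : List Nat) (pre : List Char) (ss : List (List Char)),
    (qs.map (· + pre.length)).foldl altStep (ss.map (pre ++ ·)) =
      (qs.foldl altStep ss).map (pre ++ ·) := by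
  intro qs
  induction qs with
  | nil => intro pre ss; simp
  | cons q qt ih =>
      intro pre ss
      simp only [List.map_cons, List.foldl_cons]
      rw [show altStep (ss.map (pre ++ ·)) (q + pre.length) = (altStep ss q).map (pre ++ ·) from by
        simp [altStep, List.flatMap_map, List.map_flatMap, altSet_prefix]]
      exact ih pre (altStep ss q)

theorem core_eq_aux : ∀ (n : Nat) (p : List Char), p.length ≤ n →
    make_continuous_core p = (altPos p 0).foldl altStep [p] := by
  intro n
  induction n with
  | zero =>
      intro p hp
      have : p = [] := List.length_eq_zero_iff.mp (Nat.le_zero.mp hp)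
      subst this
      simp [make_continuous_core, mcAux, altPos]
  | succ n ih =>
      intro p hp
      rw [make_continuous_core.eq_def]
      cases hm : mcAux p 0 none with
      | none =>
          have h0 : (altPos p 0).head? = none := by
            have := mcAux_first p
            rw [hm] at this
            exact (Option.map_eq_none_iff).mp this.symm
          rw [List.head?_eq_none_iff.mp h0]
          simp
      | some j =>
          have hfirst := mcAux_first p
          rw [hm] at hfirst
          obtain ⟨m, t, hpos⟩ : ∃ m t, altPos p 0 = m :: t := by
            cases halt : altPos p 0 with
            | nil => rw [halt] at hfirst; simp at hfirst
            | cons m t => exact ⟨m, t, rfl⟩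
          rw [hpos] at hfirst
          simp only [List.head?_cons, Option.map_some, Option.some.injEq] at hfirst
          have hj : j = m + 1 := hfirst
          have hjlen : j < p.length := by
            have := (mcAux_bounds p 0 none j hm).2; omega
          have ht : t = (altPos (p.drop (m+1)) 0).map (· + (m+1)) := by
            have := altPos_tail p 0 m t hpos
            simp only [Nat.sub_zero] at this
            rw [this]
            have := altPos_shift (p.drop (m+1)) 0 (m+1)
            simpa using this
          subst hj
          have hrec := ih (p.drop (m+1)) (by simp; omega)
          simp only [hpos, hrec, List.foldl_cons]
          have hstep : altStep [p] m = [altSet p m '0', altSet p m '1'] := by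
            simp [altStep]
          rw [hstep, ht]
          rw [show ([altSet p m '0', altSet p m '1'] : List (List Char)) =
              [altSet p m '0'] ++ [altSet p m '1'] from rfl]
          rw [foldl_altStep_append]
          have hsplit : ∀ b : Char, (altSet p m b : List Char) = (p.take m ++ [b]) ++ p.drop (m+1) := by
            intro b; simp [altSet]
          have hlen : ∀ b : Char, (p.take m ++ [b]).length = m + 1 := by
            intro b; simp; omega
          have hfact : ∀ b : Char,
              ((altPos (p.drop (m+1)) 0).map (· + (m+1))).foldl altStep [altSet p m b] =
              ((altPos (p.drop (m+1)) 0).foldl altStep [p.drop (m+1)]).map ((p.take m ++ [b]) ++ ·) := by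
            intro b
            have := foldl_altStep_prefix (altPos (p.drop (m+1)) 0) (p.take m ++ [b]) [p.drop (m+1)]
            rw [hlen b] at this
            rw [← this, hsplit b]
            simp
          rw [hfact '0', hfact '1']
          simp [← hrec]

theorem core_eq (p : List Char) :
    make_continuous_core p = (altPos p 0).foldl altStep [p] :=
  core_eq_aux p.length p le_rfl

-- ===== VERDICT (by name: the statement is the Claim_ definition above) =====
theorem make_continuous_spec : Claim_equal_make_continuous := by
  intro pattern _
  unfold Spec_make_continuous make_continuous make_continuous_alt
  rw [core_eq]
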